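-- pv_equiv track=rewrite | github.com/hicann/skills | ops-lab/ops-easyasc-dsl/agent/scripts/select_kernel_example.py | _find_token_overlap
-- ===== SOURCE A (Python) =====
-- from typing import Any, Dict, Iterable, List, Optional, Sequence, Set, Tuple
--
-- def _find_token_overlap(tokens: Sequence[str], token_set: Set[str]) -> Set[str]:
--     overlap = set()
--     for token in tokens:
--         if token in token_set:
--             overlap.add(token)
--             continue
--         if len(token) < 3:
--             continue
--         if any(candidate.startswith(token) or token.startswith(candidate) for candidate in token_set):
--             overlap.add(token)
--     return overlap
-- ===== SOURCE B (Python) =====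
-- def _find_token_overlap(tokens, token_set):
--     ts = set(token_set)
--     prefixes = set()
--     for c in ts:
--         for i in range(len(c) + 1):
--             prefixes.add(c[:i])
--     overlap = set()
--     for token in tokens:
--         if token in ts or (len(token) >= 3 and
--                            (token in prefixes or
--                             any(token[:i] in ts for i in range(len(token))))):
--             overlap.add(token)
--     return overlap
-- ===== Notes on version B (the rewrite author's own statement) =====
-- stated objective: faster
-- what changed: replaces the per-token linear scan over token_set with two hash-set lookups: a precomputed set of all prefixes of token_set elements answers 'some candidate starts with token', and membership tests of the token's own proper prefixes answer 'token starts with some candidate'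
import Mathlib
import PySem

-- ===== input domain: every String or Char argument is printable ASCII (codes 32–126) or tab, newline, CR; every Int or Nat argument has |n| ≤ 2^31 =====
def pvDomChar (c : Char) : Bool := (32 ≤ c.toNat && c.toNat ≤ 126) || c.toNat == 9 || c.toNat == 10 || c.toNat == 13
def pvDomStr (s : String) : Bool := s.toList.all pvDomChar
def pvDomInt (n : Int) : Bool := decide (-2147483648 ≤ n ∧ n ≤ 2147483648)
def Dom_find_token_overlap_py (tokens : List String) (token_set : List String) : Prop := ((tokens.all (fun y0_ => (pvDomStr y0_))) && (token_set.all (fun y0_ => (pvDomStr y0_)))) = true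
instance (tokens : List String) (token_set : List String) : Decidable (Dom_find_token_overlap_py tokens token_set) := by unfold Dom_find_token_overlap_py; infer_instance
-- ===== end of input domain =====

-- B replaces the per-token linear scan over token_set by hash-set lookups (a precomputed prefix set); objective: faster.
-- ===== PORT A =====
def find_token_overlap_py (tokens : List String) (token_set : List String) : List String :=
  tokens.foldl (fun overlap token =>
    if PySem.Set.contains token_set token then PySem.Set.add overlap token
    else if PySem.Str.len token < 3 then overlap
    else if token_set.any (fun candidate =>
            PySem.Str.startswith candidate token || PySem.Str.startswith token candidate) then
      PySem.Set.add overlap token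
    else overlap) PySem.Set.empty

-- ===== PORT B =====
-- token[:i] (i a nonnegative index)
def pvTakeStr (s : String) (i : Nat) : String := PySem.Str.slice s none (some (i : Int))

-- the nested loop building {c[:i] for c in ts, 0 <= i <= len(c)}
def pvPrefixes (ts : PySem.Set String) : PySem.Set String :=
  ts.foldl (fun acc c =>
    (List.range ((PySem.Str.len c).toNat + 1)).foldl
      (fun acc i => PySem.Set.add acc (pvTakeStr c i)) acc)
    PySem.Set.empty

def find_token_overlap_py_alt (tokens : List String) (token_set : List String) : List String :=
  let ts : PySem.Set String := PySem.Set.ofList token_set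
  let prefixes : PySem.Set String := pvPrefixes ts
  tokens.foldl (fun overlap token =>
    if PySem.Set.contains ts token ||
       (decide (3 ≤ PySem.Str.len token) &&
        (PySem.Set.contains prefixes token ||
         (List.range (PySem.Str.len token).toNat).any
           (fun i => PySem.Set.contains ts (pvTakeStr token i)))) then
      PySem.Set.add overlap token
    else overlap) PySem.Set.empty

-- ===== PRECONDITION & SPEC =====
def Spec_find_token_overlap_py (tokens : List String) (token_set : List String) (out : List String) : Prop := out = find_token_overlap_py_alt tokens token_set
instance (tokens : List String) (token_set : List String) (out : List String) : Decidable (Spec_find_token_overlap_py tokens token_set out) := by unfold Spec_find_token_overlap_py; infer_instance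

-- ===== CLAIM (what is proved, stated in full; the proofs are below) =====
def Claim_equal_find_token_overlap_py : Prop := ∀ (tokens : List String) (token_set : List String), Dom_find_token_overlap_py tokens token_set → Spec_find_token_overlap_py tokens token_set (find_token_overlap_py tokens token_set)

-- ===== LEMMAS AND PROOFS =====

lemma pvTakeStr_toList (s : String) (i : Nat) : (pvTakeStr s i).toList = s.toList.take i := by
  rw [pvTakeStr, PySem.Str.toList_slice, PySem.Chars.slice_eq_listSlice, PySem.List.slice_to_natCast]

lemma pvTakeStr_eq_iff (t s : String) (i : Nat) : t = pvTakeStr s i ↔ t.toList = s.toList.take i := by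
  rw [← pvTakeStr_toList, String.toList_inj]

lemma mem_prefixFold (l : List String) (init : PySem.Set String) (t : String) :
    t ∈ l.foldl (fun acc c =>
        (List.range ((PySem.Str.len c).toNat + 1)).foldl
          (fun acc i => PySem.Set.add acc (pvTakeStr c i)) acc) init
    ↔ t ∈ init ∨ ∃ c ∈ l, ∃ i ≤ (PySem.Str.len c).toNat, t = pvTakeStr c i := by
  induction l generalizing init with
  | nil => simp
  | cons c l ih =>
    rw [List.foldl_cons, ih, PySem.Set.mem_foldl_add]
    simp only [List.mem_cons, List.mem_range, Nat.lt_succ_iff]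
    constructor
    · rintro ((hi | ⟨i, hi, ht⟩) | ⟨d, hd, i, hi, ht⟩)
      · exact Or.inl hi
      · exact Or.inr ⟨c, Or.inl rfl, i, hi, ht⟩
      · exact Or.inr ⟨d, Or.inr hd, i, hi, ht⟩
    · rintro (hi | ⟨d, (rfl | hd), i, hi, ht⟩)
      · exact Or.inl (Or.inl hi)
      · exact Or.inl (Or.inr ⟨i, hi, ht⟩)
      · exact Or.inr ⟨d, hd, i, hi, ht⟩

lemma mem_pvPrefixes (ts : PySem.Set String) (t : String) :
    t ∈ pvPrefixes ts ↔ ∃ c ∈ ts, ∃ i ≤ (PySem.Str.len c).toNat, t = pvTakeStr c i := by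
  rw [pvPrefixes, mem_prefixFold]
  simp [PySem.Set.empty]

lemma cond_eq (token : String) (token_set : List String) (h : token ∉ token_set) :
    token_set.any (fun candidate =>
      PySem.Str.startswith candidate token || PySem.Str.startswith token candidate)
    = (PySem.Set.contains (pvPrefixes (PySem.Set.ofList token_set)) token ||
        (List.range (PySem.Str.len token).toNat).any
          (fun i => PySem.Set.contains (PySem.Set.ofList token_set) (pvTakeStr token i))) := by
  rw [Bool.eq_iff_iff]
  simp only [List.any_eq_true, Bool.or_eq_true, PySem.Set.contains_iff, PySem.Set.mem_ofList,
    mem_pvPrefixes, List.mem_range, PySem.Str.startswith_eq, PySem.Chars.startswith_iff,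
    PySem.Str.len_eq, Int.toNat_natCast]
  constructor
  · rintro ⟨c, hc, hpc | hcp⟩
    · left
      exact ⟨c, hc, token.toList.length, hpc.length_le, by
        rw [pvTakeStr_eq_iff]; exact List.prefix_iff_eq_take.mp hpc⟩
    · right
      have hne : c.toList ≠ token.toList := fun e => h (String.toList_inj.mp e ▸ hc)
      have htake : c.toList = token.toList.take c.toList.length := List.prefix_iff_eq_take.mp hcp
      have hlt : c.toList.length < token.toList.length := by
        rcases Nat.lt_or_ge c.toList.length token.toList.length with hlt | hge
        · exact hlt
        · exact absurd (by rw [htake, List.take_of_length_le hge]) hne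
      refine ⟨c.toList.length, hlt, ?_⟩
      have hc' : c = pvTakeStr token c.toList.length := by
        rw [pvTakeStr_eq_iff]; exact htake
      rwa [← hc']
  · rintro (⟨c, hc, i, _, ht⟩ | ⟨i, _, hmem⟩)
    · refine ⟨c, hc, Or.inl ?_⟩
      rw [pvTakeStr_eq_iff] at ht
      rw [ht]; exact List.take_prefix i c.toList
    · refine ⟨pvTakeStr token i, hmem, Or.inr ?_⟩
      rw [pvTakeStr_toList]; exact List.take_prefix i token.toList

-- ===== VERDICT (by name: the statement is the Claim_ definition above) =====
theorem find_token_overlap_py_spec : Claim_equal_find_token_overlap_py := by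
  intro tokens token_set _
  show find_token_overlap_py tokens token_set = find_token_overlap_py_alt tokens token_set
  rw [show find_token_overlap_py_alt tokens token_set = tokens.foldl (fun overlap token =>
    if PySem.Set.contains (PySem.Set.ofList token_set) token ||
       (decide (3 ≤ PySem.Str.len token) &&
        (PySem.Set.contains (pvPrefixes (PySem.Set.ofList token_set)) token ||
         (List.range (PySem.Str.len token).toNat).any
           (fun i => PySem.Set.contains (PySem.Set.ofList token_set) (pvTakeStr token i)))) then
      PySem.Set.add overlap token
    else overlap) PySem.Set.empty from rfl]
  unfold find_token_overlap_py
  congr 1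
  funext overlap token
  by_cases h1 : token ∈ token_set
  · have hc1 : PySem.Set.contains token_set token = true := by simp [h1]
    have hc2 : PySem.Set.contains (PySem.Set.ofList token_set) token = true := by
      simp [PySem.Set.mem_ofList, h1]
    rw [hc1, hc2]
    simp
  · have hc1 : PySem.Set.contains token_set token = false := by simp [h1]
    have hc2 : PySem.Set.contains (PySem.Set.ofList token_set) token = false := by
      simp [PySem.Set.mem_ofList, h1]
    rw [hc1, hc2, cond_eq token token_set h1]
    have hlen : PySem.Str.len token = (token.toList.length : Int) := PySem.Str.len_eq token
    rcases Nat.lt_or_ge token.toList.length 3 with h2 | h2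
    · have ha : PySem.Str.len token < 3 := by omega
      have hb : decide (3 ≤ PySem.Str.len token) = false := by
        rw [decide_eq_false_iff_not]; omega
      rw [if_pos ha, hb]
      simp
    · have ha : ¬ (PySem.Str.len token < 3) := by omega
      have hb : decide (3 ≤ PySem.Str.len token) = true := by
        rw [decide_eq_true_eq]; omega
      rw [if_neg ha, hb, Bool.true_and, Bool.false_or]
      simp
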